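-- pv_equiv track=rewrite | github.com/ferolen/kimpy_files | 101_test.py | wordexist
-- ===== SOURCE A (Python) =====
-- fieldsize=5#field size
--
-- def wordexist(word,field):
--   chain=[]
--   for i in range(fieldsize):
--     for j in range(fieldsize):
--       if word[0]==field[i][j]:
--         chain.append([[i,j]])
--   lw=1#index of liter
--   while lw<len(word) and len(chain):
--     newchain=[]
--     for s in chain:
--       last=s[-1]
--       for i in range(max(0,last[0]-1),min(last[0]+1,fieldsize-1)+1):
--         for j in range(max(0,last[1]-1),min(last[1]+1,fieldsize-1)+1):
--           if (word[lw]==field[i][j]) and (not [i,j] in s):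
--             newchain.append(s+[[i,j]])
--     chain=newchain.copy()
--     lw+=1
--   return([chain])
-- ===== SOURCE B (Python) =====
-- fieldsize = 5
--
-- def wordexist(word, field):
--   # DFS from each start cell; stable BFS level order of A equals DFS preorder.
--   first = word[0]
--   paths = []
--
--   def dfs(path):
--     if len(path) == len(word):
--       paths.append(path)
--       return
--     r, c = path[-1]
--     letter = word[len(path)]
--     for i in range(max(0, r - 1), min(r + 1, fieldsize - 1) + 1):
--       for j in range(max(0, c - 1), min(c + 1, fieldsize - 1) + 1):
--         if letter == field[i][j] and [i, j] not in path:
--           dfs(path + [[i, j]])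
--
--   for i in range(fieldsize):
--     for j in range(fieldsize):
--       if first == field[i][j]:
--         dfs([[i, j]])
--   return [paths]
-- ===== Notes on version B (the rewrite author's own statement) =====
-- stated objective: alternative
-- what changed: Replaces A's level-by-level BFS that rebuilds the whole frontier of partial paths for each letter with a per-start-cell DFS recursion that emits completed paths in preorder (identical order because A's BFS is stable).
import Mathlib
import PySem

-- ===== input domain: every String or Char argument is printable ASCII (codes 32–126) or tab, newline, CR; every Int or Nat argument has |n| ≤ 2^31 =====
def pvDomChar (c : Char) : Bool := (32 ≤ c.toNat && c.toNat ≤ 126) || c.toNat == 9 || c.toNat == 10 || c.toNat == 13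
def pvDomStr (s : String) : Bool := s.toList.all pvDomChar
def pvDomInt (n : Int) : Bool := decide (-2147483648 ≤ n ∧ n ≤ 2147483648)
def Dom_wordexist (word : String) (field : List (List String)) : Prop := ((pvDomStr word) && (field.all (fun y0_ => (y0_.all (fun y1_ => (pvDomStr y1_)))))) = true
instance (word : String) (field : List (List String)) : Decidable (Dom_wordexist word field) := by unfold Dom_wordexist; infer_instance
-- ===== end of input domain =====

-- B replaces A's level-by-level BFS (rebuilding the whole frontier each letter) by a
-- direct DFS recursion per start cell; same return value (stable BFS leaf order = DFS preorder).

-- shared transliterations of subexpressions both Python sources contain verbatim: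
-- field[i][j]  and  word[k]==field[i][j] (a 1-char string compared with the cell string)
def pvCell (field : List (List String)) (i j : Int) : String :=
  PySem.List.pyGetD (PySem.List.pyGetD field i []) j ""

def pvHit (word : String) (k : Int) (cell : String) : Bool :=
  match PySem.Str.pyGet? word k with
  | some c => cell.toList == [c]
  | none => false

-- ===== PORT A =====
-- the double for-loop collecting the start cells
def pvStartsA (word : String) (field : List (List String)) : List (List (List Int)) :=
  (PySem.List.pyRange 0 5 1).flatMap fun i =>
    (PySem.List.pyRange 0 5 1).flatMap fun j =>
      if pvHit word 0 (pvCell field i j) then [[[i, j]]] else []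

-- body of the while loop: newchain, the extensions of one chain element s at letter lw
def pvExtA (word : String) (field : List (List String)) (lw : Int)
    (s : List (List Int)) : List (List (List Int)) :=
  let last := PySem.List.pyGetD s (-1) []
  let l0 := PySem.List.pyGetD last 0 0
  let l1 := PySem.List.pyGetD last 1 0
  (PySem.List.pyRange (max 0 (l0 - 1)) (min (l0 + 1) 4 + 1) 1).flatMap fun i =>
    (PySem.List.pyRange (max 0 (l1 - 1)) (min (l1 + 1) 4 + 1) 1).flatMap fun j =>
      if pvHit word lw (pvCell field i j) && !(s.contains [i, j]) then [s ++ [[i, j]]] else []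

-- while lw < len(word) and len(chain): fuel = len(word) - lw
def pvLoopA (word : String) (field : List (List String)) :
    Nat → Int → List (List (List Int)) → List (List (List Int))
  | 0, _, chain => chain
  | n + 1, lw, chain =>
      if chain = [] then chain
      else pvLoopA word field n (lw + 1) (chain.flatMap (pvExtA word field lw))

def wordexist (word : String) (field : List (List String)) : List (List (List (List Int))) :=
  [pvLoopA word field (word.toList.length - 1) 1 (pvStartsA word field)]

-- ===== PORT B =====
-- dfs(path): record when complete, else recurse on each matching unvisited neighbour
def pvDfsB (word : String) (field : List (List String)) :
    Nat → List (List Int) → List (List (List Int))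
  | 0, path => [path]
  | n + 1, path =>
      let last := PySem.List.pyGetD path (-1) []
      let r := PySem.List.pyGetD last 0 0
      let c := PySem.List.pyGetD last 1 0
      (PySem.List.pyRange (max 0 (r - 1)) (min (r + 1) 4 + 1) 1).flatMap fun i =>
        (PySem.List.pyRange (max 0 (c - 1)) (min (c + 1) 4 + 1) 1).flatMap fun j =>
          if pvHit word (path.length : Int) (pvCell field i j) && !(path.contains [i, j]) then
            pvDfsB word field n (path ++ [[i, j]])
          else []

def wordexist_alt (word : String) (field : List (List String)) : List (List (List (List Int))) :=
  [(PySem.List.pyRange 0 5 1).flatMap fun i =>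
     (PySem.List.pyRange 0 5 1).flatMap fun j =>
       if pvHit word 0 (pvCell field i j) then
         pvDfsB word field (word.toList.length - 1) [[i, j]]
       else []]

-- ===== PRECONDITION & SPEC =====
-- Pre_ excludes exactly the inputs where Python A raises IndexError: an empty word
-- (word[0]) or a field without 5 rows of at least 5 cells (the start scan reads all of them).
def Pre_wordexist (word : String) (field : List (List String)) : Prop :=
  word.toList ≠ [] ∧ 5 ≤ field.length ∧ ∀ r ∈ field.take 5, 5 ≤ r.length
instance (word : String) (field : List (List String)) : Decidable (Pre_wordexist word field) := by unfold Pre_wordexist; infer_instance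

def pvWitness_wordexist : String × List (List String) :=
  ("ab", [["a","b","c","d","e"],["a","b","c","d","e"],["a","b","c","d","e"],
          ["a","b","c","d","e"],["a","b","c","d","e"]])

def Spec_wordexist (word : String) (field : List (List String)) (out : List (List (List (List Int)))) : Prop := out = wordexist_alt word field
instance (word : String) (field : List (List String)) (out : List (List (List (List Int)))) : Decidable (Spec_wordexist word field out) := by unfold Spec_wordexist; infer_instance

-- ===== CLAIM (what is proved, stated in full; the proofs are below) =====
def Claim_equal_wordexist : Prop := ∀ (word : String) (field : List (List String)), Dom_wordexist word field → Pre_wordexist word field → Spec_wordexist word field (wordexist word field)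

-- ===== LEMMAS AND PROOFS =====

theorem pv_flatMap_if {α β : Type} (c : Prop) [Decidable c] (x : α) (g : α → List β) :
    (if c then [x] else []).flatMap g = if c then g x else [] := by
  split <;> simp

theorem pv_flatMap_congr {α β : Type} {f g : α → List β} :
    ∀ (l : List α), (∀ x ∈ l, f x = g x) → l.flatMap f = l.flatMap g := by
  intro l h
  induction l with
  | nil => rfl
  | cons a t ih =>
      simp only [List.flatMap_cons]
      rw [h a (by simp), ih (fun x hx => h x (by simp [hx]))]

theorem pvExtA_len (word : String) (field : List (List String)) (lw : Int)
    (s t : List (List Int)) (ht : t ∈ pvExtA word field lw s) :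
    t.length = s.length + 1 := by
  simp only [pvExtA, List.mem_flatMap] at ht
  obtain ⟨i, _, j, _, ht⟩ := ht
  split at ht
  · simp at ht; subst ht; simp
  · simp at ht

theorem pvDfsB_step (word : String) (field : List (List String)) (n : Nat)
    (p : List (List Int)) :
    pvDfsB word field (n + 1) p
      = (pvExtA word field (p.length : Int) p).flatMap (pvDfsB word field n) := by
  simp only [pvDfsB, pvExtA, List.flatMap_assoc]
  apply pv_flatMap_congr; intro i _
  apply pv_flatMap_congr; intro j _
  rw [pv_flatMap_if]

theorem pvLoopA_eq (word : String) (field : List (List String)) :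
    ∀ (n : Nat) (lw : Int) (chain : List (List (List Int))),
      (∀ s ∈ chain, (s.length : Int) = lw) →
      pvLoopA word field n lw chain = chain.flatMap (pvDfsB word field n) := by
  intro n
  induction n with
  | zero => intro lw chain _; simp [pvLoopA, pvDfsB]
  | succ n ih =>
      intro lw chain h
      by_cases hc : chain = []
      · subst hc; simp [pvLoopA]
      · rw [pvLoopA, if_neg hc,
          ih (lw + 1) _ (by
            intro t ht
            simp only [List.mem_flatMap] at ht
            obtain ⟨s, hs, hts⟩ := ht
            have h1 := pvExtA_len word field lw s t hts
            have h2 := h s hs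
            rw [h1]
            push_cast
            omega),
          List.flatMap_assoc]
        apply pv_flatMap_congr
        intro s hs
        rw [← h s hs, ← pvDfsB_step]

theorem pvStartsA_len (word : String) (field : List (List String))
    (s : List (List Int)) (hs : s ∈ pvStartsA word field) : s.length = 1 := by
  simp only [pvStartsA, List.mem_flatMap] at hs
  obtain ⟨i, _, j, _, hs⟩ := hs
  split at hs
  · simp at hs; subst hs; rfl
  · simp at hs

-- ===== VERDICT (by name: the statement is the Claim_ definition above) =====
theorem wordexist_spec : Claim_equal_wordexist := by
  intro word field _ _
  unfold Spec_wordexist wordexist wordexist_alt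
  rw [pvLoopA_eq word field _ 1 _ (by
    intro s hs; rw [pvStartsA_len word field s hs]; rfl)]
  simp only [pvStartsA]
  congr 1
  rw [List.flatMap_assoc]
  apply pv_flatMap_congr; intro i _
  rw [List.flatMap_assoc]
  apply pv_flatMap_congr; intro j _
  rw [pv_flatMap_if]
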